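-- pv_equiv track=rewrite | github.com/UTAustin-SwarmLab/Neuro-Symbolic-Video-Search-Temporal-Logic | ns_vfs/common/frame_grouping.py | prop1_u_prop2_grouping
-- ===== SOURCE A (Python) =====
-- def prop1_u_prop2_grouping(my_list):
--     # To hold the indices of non-None elements
--     groups = []
--     current_group = []
--
--     for i, elem in enumerate(my_list):
--         if elem is not None:
--             current_group.append(i)
--         elif current_group:
--             groups.append(current_group)
--             current_group = []
--
--     # Append the last group if it exists
--     if current_group:
--         groups.append(current_group)
--     return groups
-- ===== SOURCE B (Python) =====
-- def prop1_u_prop2_grouping(my_list):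
--     # Boundary detection: pair each element with its predecessor/successor via
--     # shifted copies of the list; a group starts where the element is non-None
--     # and its predecessor is None, and ends where its successor is None.
--     prev = [None] + my_list[:-1]
--     nxt = my_list[1:] + [None]
--     starts = [i for i, (x, p) in enumerate(zip(my_list, prev)) if x is not None and p is None]
--     ends = [i for i, (x, q) in enumerate(zip(my_list, nxt)) if x is not None and q is None]
--     return [list(range(s, e + 1)) for s, e in zip(starts, ends)]
-- ===== Notes on version B (the rewrite author's own statement) =====
-- stated objective: alternative
-- what changed: Replaces A's single-pass run accumulator with boundary detection: zip the list against shifted copies of itself to find group start/end indices in two staged passes, then materialize each group as range(start, end+1).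
import Mathlib
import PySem

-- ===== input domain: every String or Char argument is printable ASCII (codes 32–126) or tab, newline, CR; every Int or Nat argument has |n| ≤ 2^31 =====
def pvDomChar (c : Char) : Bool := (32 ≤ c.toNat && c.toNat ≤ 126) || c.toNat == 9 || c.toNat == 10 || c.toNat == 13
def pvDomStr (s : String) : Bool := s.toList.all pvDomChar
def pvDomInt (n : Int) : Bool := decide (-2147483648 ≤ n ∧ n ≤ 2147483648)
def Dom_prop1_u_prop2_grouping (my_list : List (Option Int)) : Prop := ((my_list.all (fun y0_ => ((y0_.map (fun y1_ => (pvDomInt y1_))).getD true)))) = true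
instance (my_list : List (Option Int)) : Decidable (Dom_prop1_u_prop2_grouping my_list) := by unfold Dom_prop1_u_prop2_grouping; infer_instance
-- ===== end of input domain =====

-- ===== PORT A =====
-- One honest line: B detects group boundaries by zipping the list against shifted
-- copies of itself (staged passes), instead of A's run accumulator; same values.
def pvStep (st : List (List Int) × List Int) (p : Int × Option Int) :
    List (List Int) × List Int :=
  match p.2 with
  | some _ => (st.1, st.2 ++ [p.1])
  | none => if st.2.isEmpty then st else (st.1 ++ [st.2], [])

def prop1_u_prop2_grouping (my_list : List (Option Int)) : List (List Int) :=
  let st := (PySem.List.enumerate my_list).foldl pvStep ([], [])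
  if st.2.isEmpty then st.1 else st.1 ++ [st.2]

-- ===== PORT B =====
-- prev = [None] + my_list[:-1]; nxt = my_list[1:] + [None];
-- starts/ends via comprehensions over enumerate(zip(...)); groups via range(s, e+1)
def prop1_u_prop2_grouping_alt (my_list : List (Option Int)) : List (List Int) :=
  let prev := (none : Option Int) :: PySem.List.slice my_list none (some (-1))
  let nxt := PySem.List.slice my_list (some 1) none ++ [(none : Option Int)]
  let starts := (PySem.List.enumerate (my_list.zip prev)).filterMap
      (fun p => if p.2.1.isSome && p.2.2.isNone then some p.1 else none)
  let ends := (PySem.List.enumerate (my_list.zip nxt)).filterMap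
      (fun p => if p.2.1.isSome && p.2.2.isNone then some p.1 else none)
  (starts.zip ends).map (fun p => PySem.List.pyRange p.1 (p.2 + 1) 1)

-- ===== PRECONDITION & SPEC =====
def Spec_prop1_u_prop2_grouping (my_list : List (Option Int)) (out : List (List Int)) : Prop := out = prop1_u_prop2_grouping_alt my_list
instance (my_list : List (Option Int)) (out : List (List Int)) : Decidable (Spec_prop1_u_prop2_grouping my_list out) := by unfold Spec_prop1_u_prop2_grouping; infer_instance

-- ===== CLAIM (what is proved, stated in full; the proofs are below) =====
def Claim_equal_prop1_u_prop2_grouping : Prop := ∀ (my_list : List (Option Int)), Dom_prop1_u_prop2_grouping my_list → Spec_prop1_u_prop2_grouping my_list (prop1_u_prop2_grouping my_list)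

-- ===== LEMMAS AND PROOFS =====

-- canonical form: maximal runs of equal `isSome` key (proof-side only)
def pvGroupby (l : List (Int × Option Int)) : List (Bool × List (Int × Option Int)) :=
  match l with
  | [] => []
  | x :: xs =>
    (x.2.isSome, x :: xs.takeWhile (fun y => y.2.isSome == x.2.isSome)) ::
      pvGroupby (xs.dropWhile (fun y => y.2.isSome == x.2.isSome))
termination_by l.length
decreasing_by simpa using Nat.lt_succ_of_le (List.length_dropWhile_le _ _)

def pvCollect (l : List (Int × Option Int)) : List (List Int) :=
  (pvGroupby l).filterMap (fun g => if g.1 then some (g.2.map Prod.fst) else none)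

theorem pvGroupby_cons (x : Int × Option Int) (xs : List (Int × Option Int)) :
    pvGroupby (x :: xs) =
      (x.2.isSome, x :: xs.takeWhile (fun y => y.2.isSome == x.2.isSome)) ::
        pvGroupby (xs.dropWhile (fun y => y.2.isSome == x.2.isSome)) := by
  rw [pvGroupby]

-- start indices with offset a, flag pn = "previous element was None (or start)"
def pvS (a : Int) (pn : Bool) : List (Option Int) → List Int
  | [] => []
  | x :: xs => (if x.isSome && pn then [a] else []) ++ pvS (a + 1) x.isNone xs

-- end indices with offset a (next element is the head of the tail, or None)
def pvE (a : Int) : List (Option Int) → List Int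
  | [] => []
  | x :: xs => (if x.isSome && (xs.headD none).isNone then [a] else []) ++ pvE (a + 1) xs

def pvFinish (st : List (List Int) × List Int) : List (List Int) :=
  if st.2.isEmpty then st.1 else st.1 ++ [st.2]

-- ---------- A-side: the fold equals pvCollect ----------
theorem pvFoldl_some (run : List (Int × Option Int))
    (h : ∀ p ∈ run, p.2.isSome = true) (g : List (List Int)) (c : List Int) :
    run.foldl pvStep (g, c) = (g, c ++ run.map Prod.fst) := by
  induction run generalizing c with
  | nil => simp
  | cons p t ih =>
    have hp : p.2.isSome = true := h p (by simp)
    obtain ⟨v, hv⟩ := Option.isSome_iff_exists.mp hp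
    simp only [List.foldl_cons, pvStep, hv]
    rw [ih (fun q hq => h q (by simp [hq]))]
    simp

theorem pvFoldl_none (run : List (Int × Option Int))
    (h : ∀ p ∈ run, p.2.isSome = false) (g : List (List Int)) :
    run.foldl pvStep (g, ([] : List Int)) = (g, []) := by
  induction run with
  | nil => rfl
  | cons p t ih =>
    have hp : p.2 = none := Option.not_isSome_iff_eq_none.mp (by simp [h p (by simp)])
    simp only [List.foldl_cons, pvStep, hp, List.isEmpty_nil, if_pos]
    exact ih (fun q hq => h q (by simp [hq]))

theorem pvDropWhile_head {α : Type} (p : α → Bool) (t : List α) (y : α)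
    (rr : List α) (h : t.dropWhile p = y :: rr) : p y = false := by
  induction t with
  | nil => simp at h
  | cons a t ih =>
    by_cases ha : p a
    · exact ih (by simpa [ha] using h)
    · simp [ha] at h
      simpa [h.1] using ha

theorem pvMain (n : Nat) (xs : List (Int × Option Int)) (hn : xs.length ≤ n)
    (g : List (List Int)) :
    pvFinish (xs.foldl pvStep (g, [])) = g ++ pvCollect xs := by
  induction n generalizing xs g with
  | zero =>
    have : xs = [] := List.length_eq_zero_iff.mp (Nat.le_zero.mp hn)
    subst this; simp [pvFinish, pvCollect, pvGroupby]
  | succ n ih =>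
    match xs with
    | [] => simp [pvFinish, pvCollect, pvGroupby]
    | x :: t =>
      set k := x.2.isSome with hk
      set run := t.takeWhile (fun y => y.2.isSome == k) with hrun
      set rest := t.dropWhile (fun y => y.2.isSome == k) with hrest
      have hsplit : t = run ++ rest := (List.takeWhile_append_dropWhile).symm
      have hrunmem : ∀ p ∈ run, p.2.isSome = k := by
        intro p hp
        simpa using List.mem_takeWhile_imp hp
      have hrestlen : rest.length ≤ n := by
        have h1 : rest.length ≤ t.length := List.length_dropWhile_le _ _
        simp only [List.length_cons] at hn
        omega
      have hgb : pvCollect (x :: t) =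
          (if k then [(x :: run).map Prod.fst] else []) ++ pvCollect rest := by
        rw [pvCollect, pvGroupby]
        simp only [← hk, ← hrun, ← hrest, List.filterMap_cons]
        by_cases hkk : k = true
        · simp [hkk, pvCollect]
        · have hk0 : k = false := Bool.eq_false_iff.mpr hkk
          simp [hk0, pvCollect]
      have hxt : x :: t = (x :: run) ++ rest := by rw [hsplit]; rfl
      have hfold : (x :: t).foldl pvStep (g, ([] : List Int)) =
          rest.foldl pvStep ((x :: run).foldl pvStep (g, [])) := by
        rw [hxt, List.foldl_append]
      by_cases hkk : k = true
      · -- x is not None: the leading run is all `some`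
        obtain ⟨v, hv⟩ := Option.isSome_iff_exists.mp (hk ▸ hkk)
        have hrun' : (x :: run).foldl pvStep (g, ([] : List Int)) =
            (g, (x :: run).map Prod.fst) := by
          rw [pvFoldl_some]
          · simp
          · intro p hp
            rcases List.mem_cons.mp hp with h1 | h1
            · subst h1; simp [hv]
            · rw [hrunmem p h1, hkk]
        rw [hfold, hrun']
        set cs := (x :: run).map Prod.fst with hcs
        have hcsne : cs.isEmpty = false := by simp [hcs]
        match hre : rest with
        | [] =>
          simp only [List.foldl_nil, pvFinish, hcsne]
          rw [hgb, hkk]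
          simp [pvCollect, pvGroupby]
        | y :: rr =>
          have hy : y.2.isSome = false := by
            have := pvDropWhile_head (fun y => y.2.isSome == k) t y rr (hrest ▸ hre ▸ rfl)
            simpa [hkk] using this
          have hy' : y.2 = none := Option.not_isSome_iff_eq_none.mp (by simp [hy])
          have hstep : pvStep (g, cs) y = (g ++ [cs], []) := by
            simp [pvStep, hy', hcsne]
          rw [List.foldl_cons, hstep]
          have hstep2 : pvStep (g ++ [cs], []) y = (g ++ [cs], []) := by
            simp [pvStep, hy']
          have hrest' := ih (y :: rr) (hre ▸ hrestlen) (g ++ [cs])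
          rw [List.foldl_cons, hstep2] at hrest'
          rw [hrest', hgb, hkk]
          simp
      · -- x is None and current_group is empty: nothing happens
        have hk0 : k = false := Bool.eq_false_iff.mpr hkk
        have hxf : x.2.isSome = false := hk ▸ hk0
        have hx : x.2 = none := Option.not_isSome_iff_eq_none.mp (by simp [hxf])
        have hrun' : (x :: run).foldl pvStep (g, ([] : List Int)) = (g, []) := by
          apply pvFoldl_none
          intro p hp
          rcases List.mem_cons.mp hp with h1 | h1
          · subst h1; simp [hx]
          · rw [hrunmem p h1, hk0]
        rw [hfold, hrun', ih rest hrestlen g, hgb, hk0]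
        simp

-- ---------- B-side: the comprehensions compute pvS / pvE ----------
theorem pvZip_dropLast {α : Type} (xs : List α) (p : α) :
    xs.zip (p :: xs.dropLast) = xs.zip (p :: xs) := by
  induction xs generalizing p with
  | nil => rfl
  | cons x t ih =>
    cases t with
    | nil => rfl
    | cons y r =>
      simp only [List.dropLast_cons₂, List.zip_cons_cons]
      have h := ih x
      simp only [List.zip_cons_cons, List.cons.injEq, true_and] at h
      rw [h]

theorem pvStarts_rec (xs : List (Option Int)) (p : Option Int) (a : Int) :
    (PySem.List.enumerate (xs.zip (p :: xs)) a).filterMap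
      (fun q => if q.2.1.isSome && q.2.2.isNone then some q.1 else none) =
    pvS a p.isNone xs := by
  induction xs generalizing p a with
  | nil => rfl
  | cons x t ih =>
    simp only [List.zip_cons_cons, PySem.List.enumerate_cons, List.filterMap_cons]
    rw [ih x (a + 1)]
    by_cases hx : x.isSome = true
    · cases hp : p.isNone <;> simp [pvS, hx]
    · have : x.isSome = false := by simpa using hx
      simp [pvS, this]

theorem pvEnds_rec (xs : List (Option Int)) (a : Int) :
    (PySem.List.enumerate (xs.zip (xs.drop 1 ++ [(none : Option Int)])) a).filterMap
      (fun q => if q.2.1.isSome && q.2.2.isNone then some q.1 else none) =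
    pvE a xs := by
  induction xs generalizing a with
  | nil => rfl
  | cons x t ih =>
    have hz : (x :: t).zip (t ++ [(none : Option Int)]) =
        (x, t.headD none) :: t.zip (t.drop 1 ++ [(none : Option Int)]) := by
      cases t with
      | nil => rfl
      | cons y r => simp
    simp only [List.drop_one, List.tail_cons] at *
    rw [hz]
    simp only [PySem.List.enumerate_cons, List.filterMap_cons]
    rw [ih (a + 1)]
    by_cases hx : x.isSome = true
    · cases hn : t.headD none <;> simp [pvE, hx, ← List.headD_eq_head?_getD, hn]
    · have : x.isSome = false := by simpa using hx
      simp [pvE, this]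

-- ---------- run lemmas for pvS / pvE ----------
theorem pvS_some_run (r : List (Option Int)) (h : ∀ x ∈ r, x.isSome = true)
    (a : Int) (rest : List (Option Int)) :
    pvS a false (r ++ rest) = pvS (a + r.length) false rest := by
  induction r generalizing a with
  | nil => simp
  | cons x t ih =>
    have hx : x.isSome = true := h x (by simp)
    have hxn : x.isNone = false := by cases x <;> simp_all
    have hstep : pvS a false ((x :: t) ++ rest) =
        (if (x.isSome && false) then [a] else []) ++ pvS (a + 1) x.isNone (t ++ rest) := rfl
    rw [hstep, hxn, ih (fun y hy => h y (by simp [hy])) (a + 1)]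
    have h1 : a + 1 + (t.length : Int) = a + ((x :: t).length : Int) := by
      simp only [List.length_cons]; push_cast; ring
    rw [h1]
    simp

theorem pvS_none_run (r : List (Option Int)) (h : ∀ x ∈ r, x.isSome = false)
    (a : Int) (rest : List (Option Int)) :
    pvS a true (r ++ rest) = pvS (a + r.length) true rest := by
  induction r generalizing a with
  | nil => simp
  | cons x t ih =>
    have hx : x.isSome = false := h x (by simp)
    have hxn : x.isNone = true := by cases x <;> simp_all
    have hstep : pvS a true ((x :: t) ++ rest) =
        (if (x.isSome && true) then [a] else []) ++ pvS (a + 1) x.isNone (t ++ rest) := rfl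
    rw [hstep, hx, hxn, ih (fun y hy => h y (by simp [hy])) (a + 1)]
    have h1 : a + 1 + (t.length : Int) = a + ((x :: t).length : Int) := by
      simp only [List.length_cons]; push_cast; ring
    rw [h1]
    simp

theorem pvS_head_none (a : Int) (rest : List (Option Int))
    (h : (rest.headD none).isNone = true) :
    pvS a false rest = pvS a true rest := by
  cases rest with
  | nil => rfl
  | cons y rr =>
    have hy : y.isSome = false := by
      simp only [List.headD_cons] at h
      cases y <;> simp_all
    simp [pvS, hy]

theorem pvE_some_run (r : List (Option Int)) (h : ∀ x ∈ r, x.isSome = true)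
    (hr : r ≠ []) (a : Int) (rest : List (Option Int))
    (hrest : (rest.headD none).isNone = true) :
    pvE a (r ++ rest) = (a + r.length - 1) :: pvE (a + r.length) rest := by
  induction r generalizing a with
  | nil => exact absurd rfl hr
  | cons x t ih =>
    have hx : x.isSome = true := h x (by simp)
    cases t with
    | nil =>
      have hstep : pvE a ([x] ++ rest) =
          (if (x.isSome && (rest.headD none).isNone) then [a] else []) ++
            pvE (a + 1) rest := rfl
      rw [hstep, hx, hrest]
      norm_num
    | cons y w =>
      have hy : y.isSome = true := h y (by simp)
      have hyn : ((y :: (w ++ rest)).headD none).isNone = false := by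
        cases y <;> simp_all
      have hstep : pvE a ((x :: y :: w) ++ rest) =
          (if (x.isSome && ((y :: (w ++ rest)).headD none).isNone) then [a] else []) ++
            pvE (a + 1) ((y :: w) ++ rest) := rfl
      rw [hstep]
      rw [ih (fun z hz => h z (by simp [hz])) (by simp) (a + 1)]
      have h1 : a + 1 + ((y :: w).length : Int) = a + ((x :: y :: w).length : Int) := by
        simp only [List.length_cons]; push_cast; ring
      rw [h1]
      simp only [hyn, Bool.and_false]
      simp

theorem pvE_none_run (r : List (Option Int)) (h : ∀ x ∈ r, x.isSome = false)
    (a : Int) (rest : List (Option Int)) :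
    pvE a (r ++ rest) = pvE (a + r.length) rest := by
  induction r generalizing a with
  | nil => simp
  | cons x t ih =>
    have hx : x.isSome = false := h x (by simp)
    have hstep : pvE a ((x :: t) ++ rest) =
        (if (x.isSome && (((t ++ rest).headD none).isNone)) then [a] else []) ++
          pvE (a + 1) (t ++ rest) := rfl
    rw [hstep, hx, ih (fun y hy => h y (by simp [hy])) (a + 1)]
    have h1 : a + 1 + (t.length : Int) = a + ((x :: t).length : Int) := by
      simp only [List.length_cons]; push_cast; ring
    rw [h1]
    simp

-- enumerate distributes over append
theorem pvEnum_append (u v : List (Option Int)) (a : Int) :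
    PySem.List.enumerate (u ++ v) a =
      PySem.List.enumerate u a ++ PySem.List.enumerate v (a + u.length) := by
  induction u generalizing a with
  | nil => simp [PySem.List.enumerate_nil]
  | cons x t ih =>
    simp only [List.cons_append, PySem.List.enumerate_cons, ih (a + 1), List.length_cons]
    congr 2
    push_cast
    ring

-- ---------- main: zip of starts/ends equals pvCollect of the enumeration ----------
theorem pvMainB (n : Nat) (xs : List (Option Int)) (hn : xs.length ≤ n) (a : Int) :
    ((pvS a true xs).zip (pvE a xs)).map
        (fun p => PySem.List.pyRange p.1 (p.2 + 1) 1) =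
      pvCollect (PySem.List.enumerate xs a) := by
  induction n generalizing xs a with
  | zero =>
    have : xs = [] := List.length_eq_zero_iff.mp (Nat.le_zero.mp hn)
    subst this; simp [pvS, pvE, pvCollect, pvGroupby, PySem.List.enumerate_nil]
  | succ n ih =>
    match xs with
    | [] => simp [pvS, pvE, pvCollect, pvGroupby, PySem.List.enumerate_nil]
    | x :: t =>
      set run := t.takeWhile (fun y => y.isSome == x.isSome) with hrun
      set rest := t.dropWhile (fun y => y.isSome == x.isSome) with hrest
      have hsplit : t = run ++ rest := (List.takeWhile_append_dropWhile).symm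
      have hrunmem : ∀ y ∈ run, y.isSome = x.isSome := by
        intro y hy
        simpa using List.mem_takeWhile_imp hy
      have hrestlen : rest.length ≤ n := by
        have h1 : rest.length ≤ t.length := List.length_dropWhile_le _ _
        simp only [List.length_cons] at hn
        omega
      have hresthead : ∀ y rr, rest = y :: rr → y.isSome = !x.isSome := by
        intro y rr hre
        have hd : t.dropWhile (fun z => z.isSome == x.isSome) = y :: rr := by
          rw [← hrest]; exact hre
        have := pvDropWhile_head (fun z => z.isSome == x.isSome) t y rr hd
        cases hxs : x.isSome <;> simp [hxs] at this ⊢ <;> simp [this]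
      -- pvCollect of the enumeration decomposes along the run
      have henum : PySem.List.enumerate (x :: t) a =
          PySem.List.enumerate (x :: run) a ++
            PySem.List.enumerate rest (a + (x :: run).length) := by
        conv_lhs => rw [show x :: t = (x :: run) ++ rest from by rw [hsplit]; rfl]
        exact pvEnum_append _ _ a
      by_cases hkk : x.isSome = true
      · -- leading run of non-None elements
        have hallsome : ∀ y ∈ (x :: run), y.isSome = true := by
          intro y hy
          rcases List.mem_cons.mp hy with h1 | h1
          · subst h1; exact hkk
          · rw [hrunmem y h1, hkk]
        have hrn : rest ≠ [] → (rest.headD none).isNone = true := by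
          intro hne
          obtain ⟨y, rr, hre⟩ := List.exists_cons_of_ne_nil hne
          have hy := hresthead y rr hre
          rw [hkk] at hy
          simp only [Bool.not_true] at hy
          rw [hre]
          simp only [List.headD_cons]
          cases y with
          | none => rfl
          | some v => simp at hy
        -- starts side
        have hS : pvS a true (x :: t) = a :: pvS (a + 1 + run.length) true rest := by
          rw [hsplit]
          show pvS a true (x :: (run ++ rest)) = _
          simp only [pvS, hkk, Bool.and_true]
          have hxn : x.isNone = false := by
            cases x with
            | none => exact absurd hkk (by simp)
            | some v => rfl
          rw [hxn, pvS_some_run run (fun y hy => hrunmem y hy ▸ hkk) (a + 1) rest]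
          by_cases hre : rest = []
          · rw [hre]
            simp [pvS]
          · rw [pvS_head_none _ _ (hrn hre)]
            simp
        -- ends side
        have hE : pvE a (x :: t) =
            (a + (x :: run).length - 1) :: pvE (a + (x :: run).length) rest := by
          rw [hsplit]
          show pvE a ((x :: run) ++ rest) = _
          apply pvE_some_run (x :: run) hallsome (by simp) a rest
          by_cases hre : rest = []
          · rw [hre]
            simp
          · exact hrn hre
        rw [hS, hE]
        simp only [List.zip_cons_cons, List.map_cons]
        have harith : a + 1 + (run.length : Int) = a + ((x :: run).length : Int) := by
          simp only [List.length_cons]; push_cast; ring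
        rw [harith, ih rest hrestlen (a + (x :: run).length)]
        -- pvCollect head group
        rw [henum]
        simp only [PySem.List.enumerate_cons, List.cons_append]
        conv_rhs => rw [pvCollect, pvGroupby_cons]
        have htake : (PySem.List.enumerate run (a + 1) ++
              PySem.List.enumerate rest (a + (x :: run).length)).takeWhile
              (fun y => y.2.isSome == true) =
            PySem.List.enumerate run (a + 1) := by
          have h1 : ∀ p ∈ PySem.List.enumerate run (a + 1), p.2.isSome = true := by
            intro p hp
            have : p.2 ∈ run := by
              have := List.mem_map_of_mem (f := (·.2)) hp
              rwa [PySem.List.map_snd_enumerate] at this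
            rw [hrunmem p.2 this, hkk]
          have hself : (PySem.List.enumerate run (a + 1)).takeWhile
              (fun y => y.2.isSome == true) = PySem.List.enumerate run (a + 1) :=
            List.takeWhile_eq_self_iff.mpr (fun p hp => by simp [h1 p hp])
          rw [List.takeWhile_append, if_pos (by rw [hself]), ]
          have : (PySem.List.enumerate rest (a + (x :: run).length)).takeWhile
              (fun y => y.2.isSome == true) = [] := by
            cases hre : rest with
            | nil => simp [PySem.List.enumerate_nil]
            | cons y rr =>
              have hy := hresthead y rr hre
              rw [hkk] at hy
              simp only [Bool.not_true] at hy
              simp [PySem.List.enumerate_cons, hy]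
          rw [this, List.append_nil]
        have hdrop : (PySem.List.enumerate run (a + 1) ++
              PySem.List.enumerate rest (a + (x :: run).length)).dropWhile
              (fun y => y.2.isSome == true) =
            PySem.List.enumerate rest (a + (x :: run).length) := by
          have h1 : ∀ p ∈ PySem.List.enumerate run (a + 1), p.2.isSome = true := by
            intro p hp
            have : p.2 ∈ run := by
              have := List.mem_map_of_mem (f := (·.2)) hp
              rwa [PySem.List.map_snd_enumerate] at this
            rw [hrunmem p.2 this, hkk]
          have hnil : (PySem.List.enumerate run (a + 1)).dropWhile
              (fun y => y.2.isSome == true) = [] :=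
            List.dropWhile_eq_nil_iff.mpr (fun p hp => by simp [h1 p hp])
          rw [List.dropWhile_append, if_pos (by rw [hnil]; rfl)]
          cases hre : rest with
          | nil => simp [PySem.List.enumerate_nil]
          | cons y rr =>
            have hy := hresthead y rr hre
            rw [hkk] at hy
            simp only [Bool.not_true] at hy
            simp [PySem.List.enumerate_cons, hy]
        rw [show ((a, x).2.isSome) = true from hkk, htake, hdrop]
        have hfst : ((a, x) :: PySem.List.enumerate run (a + 1)).map Prod.fst =
            PySem.List.pyRange a (a + (x :: run).length) 1 := by
          have h2 : (a, x) :: PySem.List.enumerate run (a + 1) =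
              PySem.List.enumerate (x :: run) a := by
            simp [PySem.List.enumerate_cons]
          rw [h2]
          simpa using PySem.List.map_fst_enumerate (x :: run) a
        rw [show a + ((x :: run).length : Int) - 1 + 1 = a + ((x :: run).length : Int) by ring]
        simp [pvCollect, hfst]
      · -- leading run of None elements: contributes nothing
        have hk0 : x.isSome = false := by simpa using hkk
        have hallnone : ∀ y ∈ (x :: run), y.isSome = false := by
          intro y hy
          rcases List.mem_cons.mp hy with h1 | h1
          · subst h1; exact hk0
          · rw [hrunmem y h1, hk0]
        have hS : pvS a true (x :: t) = pvS (a + (x :: run).length) true rest := by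
          conv_lhs => rw [show x :: t = (x :: run) ++ rest from by rw [hsplit]; rfl]
          exact pvS_none_run (x :: run) hallnone a rest
        have hE : pvE a (x :: t) = pvE (a + (x :: run).length) rest := by
          conv_lhs => rw [show x :: t = (x :: run) ++ rest from by rw [hsplit]; rfl]
          exact pvE_none_run (x :: run) hallnone a rest
        rw [hS, hE, ih rest hrestlen (a + (x :: run).length)]
        -- pvCollect: the false group is filtered out
        rw [henum]
        simp only [PySem.List.enumerate_cons, List.cons_append]
        conv_rhs => rw [pvCollect, pvGroupby_cons]
        have hmem1 : ∀ p ∈ PySem.List.enumerate run (a + 1), p.2.isSome = false := by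
          intro p hp
          have : p.2 ∈ run := by
            have := List.mem_map_of_mem (f := (·.2)) hp
            rwa [PySem.List.map_snd_enumerate] at this
          rw [hrunmem p.2 this, hk0]
        have hself : (PySem.List.enumerate run (a + 1)).takeWhile
            (fun y => y.2.isSome == false) = PySem.List.enumerate run (a + 1) :=
          List.takeWhile_eq_self_iff.mpr (fun p hp => by simp [hmem1 p hp])
        have hnil : (PySem.List.enumerate run (a + 1)).dropWhile
            (fun y => y.2.isSome == false) = [] :=
          List.dropWhile_eq_nil_iff.mpr (fun p hp => by simp [hmem1 p hp])
        have hrestfalse : (PySem.List.enumerate rest (a + (x :: run).length)).takeWhile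
            (fun y => y.2.isSome == false) = [] ∧
          (PySem.List.enumerate rest (a + (x :: run).length)).dropWhile
            (fun y => y.2.isSome == false) =
            PySem.List.enumerate rest (a + (x :: run).length) := by
          cases hre : rest with
          | nil => simp [PySem.List.enumerate_nil]
          | cons y rr =>
            have hy := hresthead y rr hre
            rw [hk0] at hy
            simp only [Bool.not_false] at hy
            simp [PySem.List.enumerate_cons]
            exact Option.isSome_iff_ne_none.mp hy
        rw [show ((a, x).2.isSome) = false from hk0]
        rw [List.takeWhile_append, List.dropWhile_append, if_pos (by rw [hself]),
          if_pos (by rw [hnil]; rfl), hrestfalse.1, hrestfalse.2, List.append_nil]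
        simp [pvCollect]

-- ===== VERDICT (by name: the statement is the Claim_ definition above) =====
theorem prop1_u_prop2_grouping_spec : Claim_equal_prop1_u_prop2_grouping := by
  intro l _
  show prop1_u_prop2_grouping l = prop1_u_prop2_grouping_alt l
  have hAe : prop1_u_prop2_grouping l =
      pvFinish ((PySem.List.enumerate l).foldl pvStep ([], [])) := rfl
  have hBe : prop1_u_prop2_grouping_alt l =
      (((PySem.List.enumerate (l.zip ((none : Option Int) ::
            PySem.List.slice l none (some (-1))))).filterMap
          (fun p => if p.2.1.isSome && p.2.2.isNone then some p.1 else none)).zip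
        ((PySem.List.enumerate (l.zip (PySem.List.slice l (some 1) none ++
            [(none : Option Int)]))).filterMap
          (fun p => if p.2.1.isSome && p.2.2.isNone then some p.1 else none))).map
        (fun p => PySem.List.pyRange p.1 (p.2 + 1) 1) := rfl
  rw [hAe, hBe, PySem.List.slice_to_neg_one, PySem.List.slice_from_one, pvZip_dropLast]
  rw [pvStarts_rec, show l.tail = l.drop 1 from (List.drop_one).symm, pvEnds_rec]
  simp only [Option.isNone_none]
  rw [pvMainB l.length l le_rfl 0]
  have hA := pvMain (PySem.List.enumerate l).length (PySem.List.enumerate l) le_rfl []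
  simpa using hA
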